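-- pv_equiv track=rewrite | github.com/Chenrui2018-cr/risb-sparse | src/risb_sparse/embedding/SolveEmbeddingSparse.py | construct_start_index
-- ===== SOURCE A (Python) =====
-- def construct_start_index(gf_struct):
-- # return a dict with keys as block names and values as start index j_start
-- #  (2(j+j_start) for up and 2(j+j_start)+1 for dn in future calculation)
--     map_dict = {}
--     idx_up, idx_dn = 0, 0
--     for name, n_orb in gf_struct:
--         if name.startswith("up"):
--             map_dict[name] = idx_up
--             idx_up += n_orb
--         elif name.startswith("dn"):
--             map_dict[name] = idx_dn
--             idx_dn += n_orb
--         else: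
--             raise ValueError("spin channel not recognized")
--     return map_dict
-- ===== SOURCE B (Python) =====
-- def construct_start_index(gf_struct):
--     # Two-phase: validate/tag each block with its spin channel first,
--     # then compute each start index as a prefix sum over the preceding
--     # same-channel orbital counts (no running idx_up/idx_dn accumulators).
--     def channel(name):
--         if name.startswith("up"):
--             return "up"
--         if name.startswith("dn"):
--             return "dn"
--         raise ValueError("spin channel not recognized")
--     tagged = [(name, n_orb, channel(name)) for name, n_orb in gf_struct]
--     return {name: sum(m for _, m, c2 in tagged[:i] if c2 == c)
--             for i, (name, _, c) in enumerate(tagged)}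
-- ===== Notes on version B (the rewrite author's own statement) =====
-- stated objective: alternative
-- what changed: Replaces the inline idx_up/idx_dn running accumulators with a validating tagging pass followed by a dict comprehension whose values are prefix sums of the preceding same-channel orbital counts.
import Mathlib
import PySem

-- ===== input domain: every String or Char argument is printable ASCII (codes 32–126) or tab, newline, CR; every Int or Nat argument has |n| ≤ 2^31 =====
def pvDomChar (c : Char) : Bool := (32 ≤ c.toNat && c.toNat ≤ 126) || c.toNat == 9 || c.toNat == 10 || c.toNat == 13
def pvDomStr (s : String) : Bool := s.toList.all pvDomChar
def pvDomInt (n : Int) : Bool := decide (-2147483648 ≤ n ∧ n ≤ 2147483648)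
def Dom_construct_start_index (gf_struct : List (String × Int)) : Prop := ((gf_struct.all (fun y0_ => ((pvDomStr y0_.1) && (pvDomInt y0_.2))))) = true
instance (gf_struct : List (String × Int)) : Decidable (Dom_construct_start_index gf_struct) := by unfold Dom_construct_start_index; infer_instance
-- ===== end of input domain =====

-- B replaces A's inline idx_up/idx_dn running accumulators by a validating tagging
-- pass plus per-entry prefix sums of preceding same-channel orbital counts (alternative
-- decomposition, same return value).

-- ===== PORT A =====
-- the for-loop of A: state (map_dict, idx_up, idx_dn); none = ValueError
def csiLoopA : List (String × Int) → PySem.Dict String Int → Int → Int → Option (PySem.Dict String Int)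
  | [], map_dict, _, _ => some map_dict
  | (name, n_orb) :: rest, map_dict, idx_up, idx_dn =>
    if PySem.Str.startswith name "up" then
      csiLoopA rest (map_dict.insert name idx_up) (idx_up + n_orb) idx_dn
    else if PySem.Str.startswith name "dn" then
      csiLoopA rest (map_dict.insert name idx_dn) idx_up (idx_dn + n_orb)
    else none

def construct_start_index (gf_struct : List (String × Int)) : List (String × Int) :=
  match csiLoopA gf_struct PySem.Dict.empty 0 0 with
  | some d => d.items
  | none => []

-- ===== PORT B =====
def csiChannel (name : String) : Option String :=
  if PySem.Str.startswith name "up" then some "up"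
  else if PySem.Str.startswith name "dn" then some "dn"
  else none

def csiTagged : List (String × Int) → Option (List (String × Int × String))
  | [] => some []
  | (name, n_orb) :: rest =>
    match csiChannel name, csiTagged rest with
    | some c, some ts => some ((name, n_orb, c) :: ts)
    | _, _ => none

-- sum(m for _, m, c2 in ts if c2 == c)
def csiPrefSum (ts : List (String × Int × String)) (c : String) : Int :=
  ts.foldl (fun acc t => if t.2.2 = c then acc + t.2.1 else acc) 0

def construct_start_index_alt (gf_struct : List (String × Int)) : List (String × Int) :=
  match csiTagged gf_struct with
  | none => []
  | some tagged =>
    ((PySem.List.enumerate tagged).foldl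
      (fun d (p : Int × (String × Int × String)) =>
        d.insert p.2.1 (csiPrefSum (PySem.List.slice tagged none (some p.1)) p.2.2.2))
      PySem.Dict.empty).items

-- ===== PRECONDITION & SPEC =====
-- Pre_ excludes exactly the inputs on which A raises ValueError: some block name
-- starts with neither "up" nor "dn" (B raises there too).
def Pre_construct_start_index (gf_struct : List (String × Int)) : Prop :=
  ∀ p ∈ gf_struct, PySem.Str.startswith p.1 "up" = true ∨ PySem.Str.startswith p.1 "dn" = true

instance (gf_struct : List (String × Int)) : Decidable (Pre_construct_start_index gf_struct) := by
  unfold Pre_construct_start_index; infer_instance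

def pvWitness_construct_start_index : (List (String × Int)) := [("up_0", 2), ("dn_0", 2), ("up_1", 1)]

def Spec_construct_start_index (gf_struct : List (String × Int)) (out : List (String × Int)) : Prop := out = construct_start_index_alt gf_struct
instance (gf_struct : List (String × Int)) (out : List (String × Int)) : Decidable (Spec_construct_start_index gf_struct out) := by unfold Spec_construct_start_index; infer_instance

-- ===== CLAIM (what is proved, stated in full; the proofs are below) =====
def Claim_equal_construct_start_index : Prop := ∀ (gf_struct : List (String × Int)), Dom_construct_start_index gf_struct → Pre_construct_start_index gf_struct → Spec_construct_start_index gf_struct (construct_start_index gf_struct)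

-- ===== LEMMAS AND PROOFS =====

-- total channel tag under Pre_
def csiChanOf (name : String) : String :=
  if PySem.Str.startswith name "up" then "up" else "dn"

def csiTag (l : List (String × Int)) : List (String × Int × String) :=
  l.map (fun p => (p.1, p.2, csiChanOf p.1))

-- A's loop on the tagged list, total
def csiFoldA : List (String × Int × String) → PySem.Dict String Int → Int → Int → PySem.Dict String Int
  | [], d, _, _ => d
  | (name, n, c) :: rest, d, iu, idn =>
    if c = "up" then csiFoldA rest (d.insert name iu) (iu + n) idn
    else csiFoldA rest (d.insert name idn) iu (idn + n)

lemma csiTagged_eq (l : List (String × Int))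
    (h : ∀ p ∈ l, PySem.Str.startswith p.1 "up" = true ∨ PySem.Str.startswith p.1 "dn" = true) :
    csiTagged l = some (csiTag l) := by
  induction l with
  | nil => rfl
  | cons hd tl ih =>
    obtain ⟨name, n⟩ := hd
    have h1 := h (name, n) (by simp)
    have h2 : csiTagged tl = some (csiTag tl) := ih (fun p hp => h p (by simp [hp]))
    rcases h1 with h1 | h1 <;>
      simp [csiTagged, csiTag, csiChannel, csiChanOf, h2] <;>
      split_ifs <;> simp_all

lemma csiLoopA_eq (l : List (String × Int))
    (h : ∀ p ∈ l, PySem.Str.startswith p.1 "up" = true ∨ PySem.Str.startswith p.1 "dn" = true) :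
    ∀ d iu idn, csiLoopA l d iu idn = some (csiFoldA (csiTag l) d iu idn) := by
  induction l with
  | nil => intro d iu idn; rfl
  | cons hd tl ih =>
    intro d iu idn
    obtain ⟨name, n⟩ := hd
    have h1 := h (name, n) (by simp)
    have ih' := ih (fun p hp => h p (by simp [hp]))
    rcases h1 with h1 | h1 <;>
      simp [csiLoopA, csiTag, csiFoldA, csiChanOf, ih'] <;>
      split_ifs <;> simp_all

lemma csiPrefSum_append (pre : List (String × Int × String)) (t : String × Int × String) (c : String) :
    csiPrefSum (pre ++ [t]) c = if t.2.2 = c then csiPrefSum pre c + t.2.1 else csiPrefSum pre c := by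
  simp [csiPrefSum, List.foldl_append]

lemma csiMain (full : List (String × Int × String)) :
    ∀ (suf pre : List (String × Int × String)) (d : PySem.Dict String Int),
    full = pre ++ suf →
    (∀ t ∈ suf, t.2.2 = "up" ∨ t.2.2 = "dn") →
    csiFoldA suf d (csiPrefSum pre "up") (csiPrefSum pre "dn")
      = (PySem.List.enumerate suf ((pre.length : Nat) : Int)).foldl
          (fun d (p : Int × (String × Int × String)) =>
            d.insert p.2.1 (csiPrefSum (PySem.List.slice full none (some p.1)) p.2.2.2)) d := by
  intro suf
  induction suf with
  | nil => intro pre d _ _; simp [csiFoldA, PySem.List.enumerate_nil]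
  | cons t rest ih =>
    intro pre d hfull hval
    obtain ⟨name, n, c⟩ := t
    have hslice : PySem.List.slice full none (some ((pre.length : Nat) : Int)) = pre := by
      rw [PySem.List.slice_to_natCast, hfull, List.take_left]
    have hc := hval (name, n, c) (by simp)
    have hfull' : full = (pre ++ [(name, n, c)]) ++ rest := by simp [hfull]
    have hval' : ∀ t ∈ rest, t.2.2 = "up" ∨ t.2.2 = "dn" := fun t ht => hval t (by simp [ht])
    rw [PySem.List.enumerate_cons, List.foldl_cons]
    rcases hc with hc | hc <;> simp only at hc <;> subst hc
    · show csiFoldA ((name, n, "up") :: rest) d _ _ = _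
      rw [show csiFoldA ((name, n, "up") :: rest) d (csiPrefSum pre "up") (csiPrefSum pre "dn")
            = csiFoldA rest (d.insert name (csiPrefSum pre "up")) (csiPrefSum pre "up" + n) (csiPrefSum pre "dn") from by simp [csiFoldA]]
      have e1 : csiPrefSum pre "up" + n = csiPrefSum (pre ++ [(name, n, "up")]) "up" := by
        rw [csiPrefSum_append]; simp
      have e2 : csiPrefSum pre "dn" = csiPrefSum (pre ++ [(name, n, "up")]) "dn" := by
        rw [csiPrefSum_append]; simp
      rw [e1, e2, ih (pre ++ [(name, n, "up")]) _ hfull' hval']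
      simp [hslice]
    · show csiFoldA ((name, n, "dn") :: rest) d _ _ = _
      rw [show csiFoldA ((name, n, "dn") :: rest) d (csiPrefSum pre "up") (csiPrefSum pre "dn")
            = csiFoldA rest (d.insert name (csiPrefSum pre "dn")) (csiPrefSum pre "up") (csiPrefSum pre "dn" + n) from by simp [csiFoldA]]
      have e1 : csiPrefSum pre "up" = csiPrefSum (pre ++ [(name, n, "dn")]) "up" := by
        rw [csiPrefSum_append]; simp
      have e2 : csiPrefSum pre "dn" + n = csiPrefSum (pre ++ [(name, n, "dn")]) "dn" := by
        rw [csiPrefSum_append]; simp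
      rw [e1, e2, ih (pre ++ [(name, n, "dn")]) _ hfull' hval']
      simp [hslice]

lemma csiTag_valid (l : List (String × Int)) :
    ∀ t ∈ csiTag l, t.2.2 = "up" ∨ t.2.2 = "dn" := by
  intro t ht
  simp [csiTag] at ht
  obtain ⟨a, b, hab, rfl⟩ := ht
  unfold csiChanOf
  split_ifs <;> simp

-- ===== VERDICT (by name: the statement is the Claim_ definition above) =====
theorem construct_start_index_spec : Claim_equal_construct_start_index := by
  intro gf_struct _ hpre
  unfold Spec_construct_start_index construct_start_index construct_start_index_alt
  rw [csiTagged_eq gf_struct hpre, csiLoopA_eq gf_struct hpre]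
  have := csiMain (csiTag gf_struct) (csiTag gf_struct) [] PySem.Dict.empty (by simp) (csiTag_valid gf_struct)
  simp only [List.length_nil, Nat.cast_zero] at this
  rw [show csiPrefSum [] "up" = 0 from rfl, show csiPrefSum [] "dn" = 0 from rfl] at this
  rw [this]
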